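-- pv_equiv track=rewrite | github.com/mathis-group/AlChemy | PyAlChemy/analysis.py | changed_expressions
-- ===== SOURCE A (Python) =====
-- def changed_expressions(compo1, compo2):
--
--     changed_counts = []
--     A = set(compo1.keys())
--     B = set(compo2.keys())
--     C = A.union(B)
--
--     for c in C:
--         a = compo1.get(c, 0)
--         b = compo2.get(c, 0)
--         changed_counts.append( abs(a - b))
--     return sum(changed_counts)
-- ===== SOURCE B (Python) =====
-- def changed_expressions(compo1, compo2):
--     xs = sorted(compo1.items(), key=lambda p: p[0])
--     ys = sorted(compo2.items(), key=lambda p: p[0])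
--     i, j, total = 0, 0, 0
--     while i < len(xs) and j < len(ys):
--         (ka, a), (kb, b) = xs[i], ys[j]
--         if ka == kb:
--             total += abs(a - b)
--             i += 1
--             j += 1
--         elif ka < kb:
--             total += abs(a)
--             i += 1
--         else:
--             total += abs(b)
--             j += 1
--     while i < len(xs):
--         total += abs(xs[i][1])
--         i += 1
--     while j < len(ys):
--         total += abs(ys[j][1])
--         j += 1
--     return total
-- ===== Notes on version B (the rewrite author's own statement) =====
-- stated objective: alternative
-- what changed: Instead of building both key sets, their union and scanning it with .get defaults, B sorts both dicts' items by key and merges them with a two-pointer scan (equal keys give |a-b|, an unmatched key its |count|), finishing with tail sweeps; correctness rests on keys being unique so the sorted merge visits exactly the union of keys once.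
import Mathlib
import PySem

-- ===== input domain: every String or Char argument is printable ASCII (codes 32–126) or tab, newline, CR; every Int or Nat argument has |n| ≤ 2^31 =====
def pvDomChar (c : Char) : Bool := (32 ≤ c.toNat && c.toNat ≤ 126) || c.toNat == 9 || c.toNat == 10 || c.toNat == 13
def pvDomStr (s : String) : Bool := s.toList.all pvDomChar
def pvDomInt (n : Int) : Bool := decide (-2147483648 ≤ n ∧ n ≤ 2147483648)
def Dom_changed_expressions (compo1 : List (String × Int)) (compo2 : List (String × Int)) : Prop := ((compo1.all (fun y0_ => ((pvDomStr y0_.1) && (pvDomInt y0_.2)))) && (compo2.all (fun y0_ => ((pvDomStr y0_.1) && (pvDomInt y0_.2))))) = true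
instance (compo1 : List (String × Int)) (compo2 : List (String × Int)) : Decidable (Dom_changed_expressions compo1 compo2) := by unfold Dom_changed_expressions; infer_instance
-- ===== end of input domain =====

-- B replaces A's union-of-key-sets scan with sort-by-key + a two-pointer merge of the two
-- item lists (equal keys |a-b|, unmatched keys |count|, tail sweeps): a different algorithm, not faster.


-- ===== PORT A =====
-- A: build key sets A, B, their union C; append |compo1.get(c,0) - compo2.get(c,0)| for each c; sum.
-- (Python iterates the union set in hash order; the sum is order-independent, so insertion order is used.)
def changed_expressions (compo1 : List (String × Int)) (compo2 : List (String × Int)) : Int :=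
  let d1 := PySem.Dict.ofList compo1
  let d2 := PySem.Dict.ofList compo2
  let A := PySem.Set.ofList d1.keys
  let B := PySem.Set.ofList d2.keys
  let C := PySem.Set.union A B
  let changed_counts := C.foldl (fun acc c => acc ++ [|PySem.Dict.getD d1 c 0 - PySem.Dict.getD d2 c 0|]) []
  changed_counts.sum

-- ===== PORT B =====
-- B-side helper: the two-pointer merge loop over the two key-sorted item lists, accumulator t;
-- the two trailing while-loops are the base cases' folds.
def pvMerge : List (String × Int) → List (String × Int) → Int → Int
  | [], ys, t => ys.foldl (fun t p => t + |p.2|) t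
  | (ka, a) :: xs, [], t => ((ka, a) :: xs).foldl (fun t p => t + |p.2|) t
  | (ka, a) :: xs, (kb, b) :: ys, t =>
      if ka = kb then pvMerge xs ys (t + |a - b|)
      else if ka < kb then pvMerge xs ((kb, b) :: ys) (t + |a|)
      else pvMerge ((ka, a) :: xs) ys (t + |b|)
termination_by xs ys _ => xs.length + ys.length

-- B: sort both dicts' items by key, then merge with two pointers.
def changed_expressions_alt (compo1 : List (String × Int)) (compo2 : List (String × Int)) : Int :=
  let xs := PySem.List.sorted (PySem.Dict.ofList compo1).items (fun p => p.1) false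
  let ys := PySem.List.sorted (PySem.Dict.ofList compo2).items (fun p => p.1) false
  pvMerge xs ys 0

-- ===== PRECONDITION & SPEC =====
def Spec_changed_expressions (compo1 : List (String × Int)) (compo2 : List (String × Int)) (out : Int) : Prop := out = changed_expressions_alt compo1 compo2
instance (compo1 : List (String × Int)) (compo2 : List (String × Int)) (out : Int) : Decidable (Spec_changed_expressions compo1 compo2 out) := by unfold Spec_changed_expressions; infer_instance

-- ===== CLAIM (what is proved, stated in full; the proofs are below) =====
def Claim_equal_changed_expressions : Prop := ∀ (compo1 : List (String × Int)) (compo2 : List (String × Int)), Dom_changed_expressions compo1 compo2 → Spec_changed_expressions compo1 compo2 (changed_expressions compo1 compo2)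

-- ===== LEMMAS AND PROOFS =====

-- proof-side lookup in an item list (0 when the key is absent)
def pvLookup0 (ys : List (String × Int)) (k : String) : Int :=
  match ys.find? (fun p => p.1 == k) with
  | some p => p.2
  | none => 0

theorem pvLookup0_nil (k : String) : pvLookup0 [] k = 0 := rfl

theorem pvLookup0_cons (kb : String) (b : Int) (ys : List (String × Int)) (k : String) :
    pvLookup0 ((kb, b) :: ys) k = if kb = k then b else pvLookup0 ys k := by
  by_cases h : kb = k
  · simp [pvLookup0, List.find?_cons_of_pos, h]
  · rw [if_neg h]
    unfold pvLookup0
    rw [List.find?_cons_of_neg (by simpa using h)]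

theorem pvLookup0_of_not_mem (ys : List (String × Int)) (k : String)
    (h : k ∉ ys.map (·.1)) : pvLookup0 ys k = 0 := by
  induction ys with
  | nil => rfl
  | cons p t ih =>
    obtain ⟨kb, b⟩ := p
    simp only [List.map_cons, List.mem_cons, not_or] at h
    rw [pvLookup0_cons, if_neg (fun he => h.1 he.symm), ih h.2]

theorem pvLookup0_of_mem (ys : List (String × Int)) (k : String) (v : Int)
    (hmem : (k, v) ∈ ys) (hnd : (ys.map (·.1)).Nodup) : pvLookup0 ys k = v := by
  induction ys with
  | nil => simp at hmem
  | cons p t ih =>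
    obtain ⟨kb, b⟩ := p
    simp only [List.map_cons, List.nodup_cons] at hnd
    rw [pvLookup0_cons]
    rcases List.mem_cons.mp hmem with h | h
    · obtain ⟨h1, h2⟩ := Prod.mk.injEq .. ▸ h
      simp [h1.symm, h2]
    · have hkm : k ∈ t.map (·.1) := List.mem_map.mpr ⟨(k, v), h, rfl⟩
      have hne : kb ≠ k := fun he => hnd.1 (he ▸ hkm)
      rw [if_neg hne, ih h hnd.2]

-- a fold adding |p.2| is a sum
theorem foldl_abs_sum (l : List (String × Int)) (t : Int) :
    l.foldl (fun t p => t + |p.2|) t = t + (l.map (fun p => |p.2|)).sum :=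
  PySem.List.foldl_add l (fun p => |p.2|) t

-- the merge computes: over xs, |value - lookup in ys|; plus |value| over ys-keys not in xs
theorem pvMerge_eq (xs ys : List (String × Int)) (t : Int)
    (hx : xs.Pairwise (fun p q => p.1 < q.1)) (hy : ys.Pairwise (fun p q => p.1 < q.1)) :
    pvMerge xs ys t
      = t + (xs.map (fun p => |p.2 - pvLookup0 ys p.1|)).sum
          + ((ys.filter (fun p => !(xs.map (·.1)).contains p.1)).map (fun p => |p.2|)).sum := by
  induction xs, ys, t using pvMerge.induct with
  | case1 ys t =>
      simp [pvMerge, foldl_abs_sum]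
  | case2 ka a xs t =>
      simp only [pvMerge, foldl_abs_sum, pvLookup0_nil, List.filter_nil, List.map_nil,
        List.sum_nil, add_zero, sub_zero]
  | case3 a xs ka b ys t ih =>
      have hx' := (List.pairwise_cons.mp hx)
      have hy' := (List.pairwise_cons.mp hy)
      rw [pvMerge, if_pos rfl, ih hx'.2 hy'.2]
      have hmap : xs.map (fun p => |p.2 - pvLookup0 ((ka, b) :: ys) p.1|)
          = xs.map (fun p => |p.2 - pvLookup0 ys p.1|) :=
        List.map_congr_left (fun p hp => by
          rw [pvLookup0_cons, if_neg (ne_of_lt (hx'.1 p hp))])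
      have hfil : ys.filter (fun p => !(((ka, a) :: xs).map (·.1)).contains p.1)
          = ys.filter (fun p => !(xs.map (·.1)).contains p.1) := by
        apply List.filter_congr
        intro p hp
        have : p.1 ≠ ka := (ne_of_gt (hy'.1 p hp))
        simp [this]
      have hhead : (!(((ka, a) :: xs).map (·.1)).contains (ka, b).1) = false := by simp
      rw [List.map_cons, List.sum_cons, pvLookup0_cons, if_pos rfl, hmap, List.filter_cons, hhead]
      simp only [Bool.false_eq_true, if_false]
      rw [hfil]
      ring
  | case4 ka a xs kb b ys t hne hlt ih =>
      have hx' := (List.pairwise_cons.mp hx)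
      rw [pvMerge, if_neg hne, if_pos hlt, ih hx'.2 hy]
      have hka : pvLookup0 ((kb, b) :: ys) ka = 0 := by
        apply pvLookup0_of_not_mem
        simp only [List.map_cons, List.mem_cons, not_or]
        refine ⟨ne_of_lt hlt, fun hm => ?_⟩
        simp only [List.mem_map] at hm
        obtain ⟨p, hp, hpk⟩ := hm
        exact absurd (hpk ▸ (List.pairwise_cons.mp hy).1 p hp) (not_lt.mpr (le_of_lt hlt))
      have hfil : ((kb, b) :: ys).filter (fun p => !(((ka, a) :: xs).map (·.1)).contains p.1)
          = ((kb, b) :: ys).filter (fun p => !(xs.map (·.1)).contains p.1) := by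
        apply List.filter_congr
        intro p hp
        have hge : kb ≤ p.1 := by
          rcases List.mem_cons.mp hp with h | h
          · rw [h]
          · exact le_of_lt ((List.pairwise_cons.mp hy).1 p h)
        have : p.1 ≠ ka := ne_of_gt (lt_of_lt_of_le hlt hge)
        simp [this]
      rw [List.map_cons, List.sum_cons, hka, hfil, sub_zero]
      ring
  | case5 ka a xs kb b ys t hne hnlt ih =>
      have hy' := (List.pairwise_cons.mp hy)
      have hlt : kb < ka := by
        rcases lt_trichotomy ka kb with h | h | h
        · exact absurd h hnlt
        · exact absurd h hne
        · exact h
      rw [pvMerge, if_neg hne, if_neg hnlt, ih hx hy'.2]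
      have hlk : ∀ p ∈ (ka, a) :: xs, pvLookup0 ((kb, b) :: ys) p.1 = pvLookup0 ys p.1 := by
        intro p hp
        have hge : ka ≤ p.1 := by
          rcases List.mem_cons.mp hp with h | h
          · rw [h]
          · exact le_of_lt ((List.pairwise_cons.mp hx).1 p h)
        rw [pvLookup0_cons, if_neg (ne_of_lt (lt_of_lt_of_le hlt hge))]
      have hkb : (((ka, a) :: xs).map (·.1)).contains kb = false := by
        simp only [List.map_cons, List.contains_cons, Bool.or_eq_false_iff]
        constructor
        · simp [ne_of_lt hlt]
        · rw [List.contains_eq_any_beq]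
          simp only [List.any_eq_false]
          intro k hk hb
          simp only [List.mem_map] at hk
          obtain ⟨p, hp, hpk⟩ := hk
          have h1 : ka < k := hpk ▸ (List.pairwise_cons.mp hx).1 p hp
          exact absurd (eq_of_beq hb) (ne_of_lt (lt_trans hlt h1))
      have hmap : ((ka, a) :: xs).map (fun p => |p.2 - pvLookup0 ((kb, b) :: ys) p.1|)
          = ((ka, a) :: xs).map (fun p => |p.2 - pvLookup0 ys p.1|) :=
        List.map_congr_left (fun p hp => by rw [hlk p hp])
      have hhead : (!(((ka, a) :: xs).map (·.1)).contains (kb, b).1) = true := by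
        rw [show ((kb, b).1) = kb from rfl, hkb]; rfl
      rw [hmap, List.filter_cons, if_pos hhead]
      simp only [List.map_cons, List.sum_cons]
      ring

-- strictly key-increasing shape of sorted items of a dict
theorem sorted_items_pairwise (c : List (String × Int)) :
    (PySem.List.sorted (PySem.Dict.ofList c).items (fun p => p.1) false).Pairwise
      (fun p q => p.1 < q.1) := by
  have hperm : (PySem.List.sorted (PySem.Dict.ofList c).items (fun p => p.1) false).Perm
      (PySem.Dict.ofList c).items := PySem.List.sorted_perm _ _ _
  have hle := PySem.List.sorted_pairwise (PySem.Dict.ofList c).items (fun p => p.1) (κ := String)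
  have hnd0 : ((PySem.Dict.ofList c).items.map (fun p => p.1)).Nodup :=
    PySem.Dict.nodup_keys_ofList c
  have hnd : ((PySem.List.sorted (PySem.Dict.ofList c).items (fun p => p.1) false).map (fun p => p.1)).Nodup :=
    ((hperm.map (fun p => p.1)).nodup_iff).mpr hnd0
  have hne : (PySem.List.sorted (PySem.Dict.ofList c).items (fun p => p.1) false).Pairwise
      (fun p q => p.1 ≠ q.1) := List.pairwise_map.mp hnd
  exact (hle.and hne).imp (fun h => lt_of_le_of_ne h.1 h.2)

theorem nodup_map_keys_sorted (c : List (String × Int)) :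
    ((PySem.List.sorted (PySem.Dict.ofList c).items (fun p => p.1) false).map (fun p => p.1)).Nodup := by
  have h0 : ((PySem.Dict.ofList c).items.map (fun p => p.1)).Nodup :=
    PySem.Dict.nodup_keys_ofList c
  exact (((PySem.List.sorted_perm (PySem.Dict.ofList c).items (fun p => p.1) false).map
    (fun p => p.1)).nodup_iff).mpr h0

-- lookup in the sorted item list = dict lookup
theorem pvLookup0_sorted (c : List (String × Int)) (k : String) :
    pvLookup0 (PySem.List.sorted (PySem.Dict.ofList c).items (fun p => p.1) false) k
      = PySem.Dict.getD (PySem.Dict.ofList c) k 0 := by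
  set d := PySem.Dict.ofList c with hd
  set ys := PySem.List.sorted d.items (fun p => p.1) false with hys
  have hperm : ys.Perm d.items := PySem.List.sorted_perm _ _ _
  cases hg : PySem.Dict.get? d k with
  | some v =>
    have hmem : (k, v) ∈ ys := hperm.mem_iff.mpr (PySem.Dict.mem_items_of_get?_eq_some d hg)
    rw [pvLookup0_of_mem ys k v hmem (nodup_map_keys_sorted c),
      PySem.Dict.getD_of_get?_eq_some d 0 hg]
  | none =>
    have hnk : k ∉ ys.map (·.1) := by
      rw [(hperm.map (·.1)).mem_iff]
      exact (PySem.Dict.get?_eq_none_iff_not_mem_keys d k).mp hg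
    rw [pvLookup0_of_not_mem ys k hnk, PySem.Dict.getD_of_get?_eq_none d 0 hg]

theorem changed_expressions_eq (compo1 compo2 : List (String × Int)) :
    changed_expressions compo1 compo2 = changed_expressions_alt compo1 compo2 := by
  unfold changed_expressions changed_expressions_alt
  simp only []
  set d1 := PySem.Dict.ofList compo1 with hd1
  set d2 := PySem.Dict.ofList compo2 with hd2
  set xs := PySem.List.sorted d1.items (fun p => p.1) false with hxs
  set ys := PySem.List.sorted d2.items (fun p => p.1) false with hys
  have hn1 : d1.keys.Nodup := PySem.Dict.nodup_keys_ofList compo1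
  have hn2 : d2.keys.Nodup := PySem.Dict.nodup_keys_ofList compo2
  have hp1 : xs.Perm d1.items := PySem.List.sorted_perm _ _ _
  have hp2 : ys.Perm d2.items := PySem.List.sorted_perm _ _ _
  -- A side: sum over d1.keys plus sum over d2.keys not in d1
  rw [PySem.List.foldl_append_singleton_eq_map]
  have hC : PySem.Set.union (PySem.Set.ofList d1.keys) (PySem.Set.ofList d2.keys)
      = d1.keys ++ (d2.keys.filter (fun y => !(PySem.Set.contains d1.keys y))) := by
    show PySem.Set.update (PySem.Set.ofList d1.keys) (PySem.Set.ofList d2.keys)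
        = d1.keys ++ _
    rw [PySem.Set.ofList_eq_self_of_nodup _ hn1, PySem.Set.update_eq_append_filter,
        PySem.Set.ofList_eq_self_of_nodup _ hn2, PySem.Set.ofList_eq_self_of_nodup _ hn2]
  rw [hC, List.nil_append, List.map_append, List.sum_append]
  -- B side
  rw [pvMerge_eq xs ys 0 (sorted_items_pairwise compo1) (sorted_items_pairwise compo2), zero_add]
  congr 1
  · -- first sums agree
    rw [show d1.keys = d1.items.map (·.1) from rfl, List.map_map]
    refine (List.Perm.sum_eq ?_).symm
    refine ((hp1.map _).trans (List.Perm.of_eq ?_))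
    refine List.map_congr_left (fun p hp => ?_)
    have hv : PySem.Dict.getD d1 p.1 0 = p.2 := PySem.Dict.getD_of_mem_items d1 hp hn1 0
    simp only [Function.comp, hv]
    rw [hys, hd2, pvLookup0_sorted compo2 p.1]
  · -- second sums agree
    rw [show d2.keys = d2.items.map (·.1) from rfl, List.filter_map, List.map_map]
    refine (List.Perm.sum_eq ?_).symm
    have hfilc : ys.filter (fun p => !(xs.map (·.1)).contains p.1)
        = ys.filter ((fun y => !(PySem.Set.contains d1.keys y)) ∘ (·.1)) := by
      apply List.filter_congr
      intro p _
      have h2 : (p.1 ∈ xs.map (fun x => x.1)) ↔ (p.1 ∈ d1.keys) :=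
        (hp1.map (fun x => x.1)).mem_iff
      have hmemiff : ((xs.map (fun x => x.1)).contains p.1) = (PySem.Set.contains d1.keys p.1) := by
        rw [PySem.Set.contains_eq_listContains, Bool.eq_iff_iff]
        simpa [List.contains_iff_mem] using h2
      simp only [Function.comp_apply, hmemiff]
    rw [hfilc]
    refine ((hp2.filter _).map _).trans (List.Perm.of_eq ?_)
    refine List.map_congr_left (fun p hp => ?_)
    have hpf := List.of_mem_filter hp
    have hpm := List.mem_of_mem_filter hp
    have hnc : PySem.Set.contains d1.keys p.1 = false := by simpa using hpf
    have h1 : PySem.Dict.getD d1 p.1 0 = 0 := by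
      apply PySem.Dict.getD_of_not_contains
      rw [PySem.Dict.contains_eq_decide_mem_keys]
      rw [PySem.Set.contains_eq_listContains] at hnc
      simpa [List.contains_iff_mem] using hnc
    have h2 : PySem.Dict.getD d2 p.1 0 = p.2 := PySem.Dict.getD_of_mem_items d2 hpm hn2 0
    simp [Function.comp, h1, h2, zero_sub, abs_neg]

-- ===== VERDICT (by name: the statement is the Claim_ definition above) =====
theorem changed_expressions_spec : Claim_equal_changed_expressions := by
  intro compo1 compo2 _
  unfold Spec_changed_expressions
  exact changed_expressions_eq compo1 compo2
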